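-- pv_equiv track=rewrite | github.com/tim5633/UK-Tender-Radar | archived/original/tender_radar.py | compute_continuous_tenure
-- ===== SOURCE A (Python) =====
-- from typing import Dict, Iterable, List, Optional, Tuple
--
-- def compute_continuous_tenure(rows: List[Dict[str, str]]) -> Tuple[str, int]:
--     if not rows:
--         return ("", 0)
--     ordered = sorted(rows, key=lambda r: r.get("year", ""), reverse=True)
--     auditor = ordered[0].get("external_auditor", "")
--     if not auditor:
--         return ("", 0)
--     n = 0
--     for r in ordered:
--         if r.get("external_auditor", "") == auditor:
--             n += 1
--         else:
--             break
--     return (auditor, n)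
-- ===== SOURCE B (Python) =====
-- from typing import Dict, List, Tuple
--
-- def compute_continuous_tenure(rows: List[Dict[str, str]]) -> Tuple[str, int]:
--     if not rows:
--         return ("", 0)
--     # distinct years, most recent first; no full sort of the rows
--     years = sorted({r.get("year", "") for r in rows}, reverse=True)
--     auditor = ""
--     for r in rows:
--         if r.get("year", "") == years[0]:
--             auditor = r.get("external_auditor", "")
--             break
--     if not auditor:
--         return ("", 0)
--     n = 0
--     for y in years:
--         stop = False
--         for r in rows:
--             if r.get("year", "") != y:
--                 continue
--             if r.get("external_auditor", "") == auditor: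
--                 n += 1
--             else:
--                 stop = True
--                 break
--         if stop:
--             break
--     return (auditor, n)
-- ===== Notes on version B (the rewrite author's own statement) =====
-- stated objective: alternative
-- what changed: Instead of stably sorting all rows by year descending and scanning the leading run, B sorts only the distinct year values descending, picks the first row of the top year for the auditor, and counts the streak by scanning rows year-bucket by year-bucket in original order, breaking at the first mismatch.
import Mathlib
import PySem

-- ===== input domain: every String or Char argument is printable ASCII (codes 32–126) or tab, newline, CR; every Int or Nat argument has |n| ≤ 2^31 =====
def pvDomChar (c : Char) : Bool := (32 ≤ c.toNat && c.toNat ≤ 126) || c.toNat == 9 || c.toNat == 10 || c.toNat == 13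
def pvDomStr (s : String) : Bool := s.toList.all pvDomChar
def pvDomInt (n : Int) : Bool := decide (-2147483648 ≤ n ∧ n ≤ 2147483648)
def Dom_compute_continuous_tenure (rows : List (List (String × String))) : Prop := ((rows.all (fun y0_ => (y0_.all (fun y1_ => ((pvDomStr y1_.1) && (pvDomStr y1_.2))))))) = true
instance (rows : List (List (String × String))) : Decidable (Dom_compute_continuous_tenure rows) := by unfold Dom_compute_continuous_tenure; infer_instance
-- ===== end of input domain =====

-- B replaces A's full stable sort of rows by a descending sort of the distinct years
-- plus per-year scans of the rows in original order (objective: alternative decomposition).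


-- ===== PORT A =====
-- r.get(k, "") on a Python dict (rows arrive as association lists)
def pvGet (r : List (String × String)) (k : String) : String := (PySem.Dict.mk r).getD k ""
def pvYear (r : List (String × String)) : String := pvGet r "year"
def pvAud (r : List (String × String)) : String := pvGet r "external_auditor"

-- the for-loop of A: count while the auditor matches, break at the first mismatch
def pvRunA (auditor : String) : List (List (String × String)) → Int → Int
  | [], n => n
  | r :: rest, n => if pvAud r = auditor then pvRunA auditor rest (n + 1) else n

def compute_continuous_tenure (rows : List (List (String × String))) : String × Int :=
  if rows = [] then ("", 0)
  else
    let ordered := PySem.List.sorted rows pvYear true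
    -- ordered[0]: ordered is nonempty here (rows ≠ []), the [] arm is unreachable
    let auditor := match ordered with | [] => "" | r :: _ => pvAud r
    if auditor = "" then ("", 0)
    else (auditor, pvRunA auditor ordered 0)

-- ===== PORT B =====
-- B's first loop: auditor of the first row whose year is y ("" if none, as the loop variable starts at "")
def pvFindAud (y : String) : List (List (String × String)) → String
  | [] => ""
  | r :: rest => if pvYear r = y then pvAud r else pvFindAud y rest

-- B's inner loop over rows for one year y: (updated n, stop flag)
def pvInnerB (aud y : String) : List (List (String × String)) → Int → Int × Bool
  | [], n => (n, false)
  | r :: rest, n =>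
    if pvYear r ≠ y then pvInnerB aud y rest n
    else if pvAud r = aud then pvInnerB aud y rest (n + 1)
    else (n, true)

-- B's outer loop over the distinct years, most recent first
def pvOuterB (aud : String) (rows : List (List (String × String))) : List String → Int → Int
  | [], n => n
  | y :: ys, n =>
    match pvInnerB aud y rows n with
    | (n', true) => n'
    | (n', false) => pvOuterB aud rows ys n'

def compute_continuous_tenure_alt (rows : List (List (String × String))) : String × Int :=
  if rows = [] then ("", 0)
  else
    let years := PySem.List.sorted (PySem.Set.ofList (rows.map pvYear)) (fun y => y) true
    -- years[0]: years is nonempty here (rows ≠ []), the [] arm is unreachable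
    let y0 := match years with | [] => "" | y :: _ => y
    let auditor := pvFindAud y0 rows
    if auditor = "" then ("", 0)
    else (auditor, pvOuterB auditor rows years 0)

-- ===== PRECONDITION & SPEC =====
def Spec_compute_continuous_tenure (rows : List (List (String × String))) (out : String × Int) : Prop := out = compute_continuous_tenure_alt rows
instance (rows : List (List (String × String))) (out : String × Int) : Decidable (Spec_compute_continuous_tenure rows out) := by unfold Spec_compute_continuous_tenure; infer_instance

-- ===== CLAIM (what is proved, stated in full; the proofs are below) =====
def Claim_equal_compute_continuous_tenure : Prop := ∀ (rows : List (List (String × String))), Dom_compute_continuous_tenure rows → Spec_compute_continuous_tenure rows (compute_continuous_tenure rows)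

-- ===== LEMMAS AND PROOFS =====

-- the group of rows carrying year y, in original order
def pvGrp (rows : List (List (String × String))) (y : String) : List (List (String × String)) :=
  rows.filter (fun r => decide (pvYear r = y))

-- the distinct years, most recent first
def pvYears (rows : List (List (String × String))) : List String :=
  PySem.List.sorted (PySem.Set.ofList (rows.map pvYear)) (fun y => y) true

-- A's counting loop restricted to one group, with a stop flag
def pvGo (aud : String) : List (List (String × String)) → Int → Int × Bool
  | [], n => (n, false)
  | r :: rest, n => if pvAud r = aud then pvGo aud rest (n + 1) else (n, true)

theorem insertBy_pass {α : Type} (p : α → α → Bool) (x : α) (l m : List α)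
    (h : ∀ b ∈ l, p x b = false) :
    PySem.List.insertBy p x (l ++ m) = l ++ PySem.List.insertBy p x m := by
  induction l with
  | nil => simp
  | cons b l ih =>
    have hb := h b (by simp)
    simp [PySem.List.insertBy, hb, ih (fun c hc => h c (by simp [hc]))]

theorem insertBy_front {α : Type} (p : α → α → Bool) (x : α) (m : List α)
    (h : ∀ b ∈ m, p x b = true) :
    PySem.List.insertBy p x m = x :: m := by
  cases m with
  | nil => simp [PySem.List.insertBy]
  | cons b m => simp [PySem.List.insertBy, h b (by simp)]

theorem years_pairwise (ks : List String) :
    (PySem.List.sorted (PySem.Set.ofList ks) (fun y => y) true).Pairwise (fun a b => b < a) := by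
  have hnd : (PySem.List.sorted (PySem.Set.ofList ks) (fun y => y) true).Nodup :=
    (PySem.List.sorted_perm _ _ _).nodup_iff.mpr (PySem.Set.nodup_ofList ks)
  have hle := PySem.List.sorted_pairwise_rev (PySem.Set.ofList ks) (fun y => y)
  exact (hle.and hnd).imp (fun {a b} h => lt_of_le_of_ne h.1 (Ne.symm h.2))

theorem insFlat_mem (x : List (String × String)) (ys : List String)
    (g : String → List (List (String × String)))
    (hpw : ys.Pairwise (fun a b => b < a))
    (hg : ∀ y ∈ ys, ∀ r ∈ g y, pvYear r = y)
    (hyx : pvYear x ∈ ys) :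
    PySem.List.insertBy (fun a b => decide (pvYear b < pvYear a)) x (ys.flatMap g)
      = ys.flatMap (fun y => g y ++ if y = pvYear x then [x] else []) := by
  induction ys with
  | nil => cases hyx
  | cons y ys ih =>
    rw [List.pairwise_cons] at hpw
    by_cases hy : y = pvYear x
    · have hpass : ∀ b ∈ g y, (fun a b => decide (pvYear b < pvYear a)) x b = false := by
        intro b hb
        have hk := hg y (by simp) b hb
        show decide (pvYear b < pvYear x) = false
        rw [hk, hy]
        exact decide_eq_false (lt_irrefl _)
      have hfront : ∀ b ∈ ys.flatMap g, (fun a b => decide (pvYear b < pvYear a)) x b = true := by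
        intro b hb
        obtain ⟨y', hy', hb'⟩ := List.mem_flatMap.mp hb
        have hk := hg y' (by simp [hy']) b hb'
        have hlt : y' < y := hpw.1 y' hy'
        show decide (pvYear b < pvYear x) = true
        rw [hk]
        exact decide_eq_true (hy ▸ hlt)
      rw [List.flatMap_cons, insertBy_pass _ _ _ _ hpass, insertBy_front _ _ _ hfront,
        List.flatMap_cons, if_pos hy]
      have hrest : ys.flatMap (fun y' => g y' ++ if y' = pvYear x then [x] else []) = ys.flatMap g := by
        apply List.flatMap_congr
        intro y' hy'
        have : y' ≠ pvYear x := by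
          have hlt : y' < y := hpw.1 y' hy'
          rw [hy] at hlt; exact ne_of_lt hlt
        simp [this]
      rw [hrest]; simp
    · have hyx' : pvYear x ∈ ys := by
        rcases List.mem_cons.mp hyx with h | h
        · exact absurd h.symm hy
        · exact h
      have hltx : pvYear x < y := hpw.1 _ hyx'
      have hpass : ∀ b ∈ g y, (fun a b => decide (pvYear b < pvYear a)) x b = false := by
        intro b hb
        have hk := hg y (by simp) b hb
        show decide (pvYear b < pvYear x) = false
        rw [hk]
        exact decide_eq_false (not_lt.mpr hltx.le)
      rw [List.flatMap_cons, insertBy_pass _ _ _ _ hpass,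
        ih hpw.2 (fun y' h1 => hg y' (by simp [h1])) hyx', List.flatMap_cons,
        if_neg hy]
      simp

theorem insFlat_new (x : List (String × String)) (ys : List String)
    (g : String → List (List (String × String)))
    (hpw : ys.Pairwise (fun a b => b < a))
    (hg : ∀ y ∈ ys, ∀ r ∈ g y, pvYear r = y)
    (hyx : pvYear x ∉ ys) :
    PySem.List.insertBy (fun a b => decide (pvYear b < pvYear a)) x (ys.flatMap g)
      = (PySem.List.insertBy (fun a b => decide (b < a)) (pvYear x) ys).flatMap
          (fun y => if y = pvYear x then [x] else g y) := by
  induction ys with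
  | nil => simp [PySem.List.insertBy]
  | cons y ys ih =>
    rw [List.pairwise_cons] at hpw
    have hy : y ≠ pvYear x := fun h => hyx (by simp [h])
    by_cases hlt : y < pvYear x
    · have hfront : ∀ b ∈ (y :: ys).flatMap g, (fun a b => decide (pvYear b < pvYear a)) x b = true := by
        intro b hb
        obtain ⟨y', hy', hb'⟩ := List.mem_flatMap.mp hb
        have hk := hg y' hy' b hb'
        show decide (pvYear b < pvYear x) = true
        rw [hk]
        rcases List.mem_cons.mp hy' with h | h
        · exact decide_eq_true (h ▸ hlt)
        · exact decide_eq_true (lt_trans (hpw.1 y' h) hlt)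
      rw [insertBy_front _ _ _ hfront]
      have hins : PySem.List.insertBy (fun a b => decide (b < a)) (pvYear x) (y :: ys)
          = pvYear x :: y :: ys := by
        simp [PySem.List.insertBy, hlt]
      have hrest : ys.flatMap (fun y' => if y' = pvYear x then [x] else g y') = ys.flatMap g := by
        apply List.flatMap_congr
        intro y' hy'
        have : y' ≠ pvYear x := fun h => hyx (List.mem_cons.mpr (Or.inr (h ▸ hy')))
        simp [this]
      rw [hins]
      simp [List.flatMap_cons, hy, hrest]
    · have hgty : pvYear x < y := lt_of_le_of_ne (not_lt.mp hlt) (Ne.symm hy)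
      have hpass : ∀ b ∈ g y, (fun a b => decide (pvYear b < pvYear a)) x b = false := by
        intro b hb
        have hk := hg y (by simp) b hb
        show decide (pvYear b < pvYear x) = false
        rw [hk]
        exact decide_eq_false (not_lt.mpr hgty.le)
      have hins : PySem.List.insertBy (fun a b => decide (b < a)) (pvYear x) (y :: ys)
          = y :: PySem.List.insertBy (fun a b => decide (b < a)) (pvYear x) ys := by
        simp [PySem.List.insertBy, not_lt.mpr (le_of_lt hgty)]
      rw [List.flatMap_cons, insertBy_pass _ _ _ _ hpass,
        ih hpw.2 (fun y' h1 => hg y' (by simp [h1])) (fun h => hyx (by simp [h])),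
        hins, List.flatMap_cons, if_neg hy]

theorem grp_key (l : List (List (String × String))) (y : String)
    (r : List (String × String)) (hr : r ∈ pvGrp l y) : pvYear r = y :=
  of_decide_eq_true (List.mem_filter.mp hr).2

theorem grp_append (xs : List (List (String × String))) (x : List (String × String))
    (y : String) :
    pvGrp (xs ++ [x]) y = pvGrp xs y ++ (if pvYear x = y then [x] else []) := by
  by_cases h : pvYear x = y <;> simp [pvGrp, List.filter_append, h]

theorem sorted_rev_append_singleton {α κ : Type} [LinearOrder κ]
    (xs : List α) (x : α) (key : α → κ) :
    PySem.List.sorted (xs ++ [x]) key true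
      = PySem.List.insertBy (fun a b => decide (key b < key a)) x
          (PySem.List.sorted xs key true) := by
  rw [PySem.List.sorted_rev_eq_foldl_insertBy (xs ++ [x]) key, List.foldl_append,
    ← PySem.List.sorted_rev_eq_foldl_insertBy xs key]
  simp

theorem years_append (xs : List (List (String × String))) (x : List (String × String)) :
    pvYears (xs ++ [x]) = if pvYear x ∈ xs.map pvYear then pvYears xs
      else PySem.List.insertBy (fun a b => decide (b < a)) (pvYear x) (pvYears xs) := by
  have hup : PySem.Set.ofList ((xs ++ [x]).map pvYear)
      = if pvYear x ∈ xs.map pvYear then PySem.Set.ofList (xs.map pvYear)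
        else PySem.Set.ofList (xs.map pvYear) ++ [pvYear x] := by
    rw [List.map_append, PySem.Set.ofList_append]
    simp only [PySem.Set.update, List.map_cons, List.map_nil, List.foldl_cons, List.foldl_nil,
      PySem.Set.add]
    by_cases h : pvYear x ∈ xs.map pvYear
    · have hc : pvYear x ∈ PySem.Set.ofList (xs.map pvYear) :=
        (PySem.Set.mem_ofList (xs.map pvYear) (pvYear x)).mpr h
      simp_all
    · have hc : ¬ pvYear x ∈ PySem.Set.ofList (xs.map pvYear) :=
        fun hcm => h ((PySem.Set.mem_ofList _ _).mp hcm)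
      simp_all
  by_cases h : pvYear x ∈ xs.map pvYear
  · simp only [pvYears, hup, if_pos h]
  · simp only [pvYears, hup, if_neg h]
    exact sorted_rev_append_singleton _ _ _

theorem sortedM (rows : List (List (String × String))) :
    PySem.List.sorted rows pvYear true = (pvYears rows).flatMap (pvGrp rows) := by
  induction rows using List.reverseRecOn with
  | nil => simp [pvYears, PySem.List.sorted, PySem.Set.ofList, PySem.Set.empty]
  | append_singleton xs x ih =>
    rw [sorted_rev_append_singleton xs x pvYear, ih, years_append]
    by_cases hmem : pvYear x ∈ xs.map pvYear
    · have hyx : pvYear x ∈ pvYears xs := by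
        simp [pvYears, PySem.List.mem_sorted, PySem.Set.mem_ofList, hmem]
      rw [if_pos hmem,
        insFlat_mem x (pvYears xs) (pvGrp xs) (years_pairwise _) (fun y _ => grp_key xs y) hyx]
      apply List.flatMap_congr
      intro y _
      rw [grp_append]
      by_cases h : y = pvYear x
      · simp [h]
      · have h2 : ¬ pvYear x = y := fun hc => h hc.symm
        simp [h, h2]
    · rw [if_neg hmem,
        insFlat_new x (pvYears xs) (pvGrp xs) (years_pairwise _) (fun y _ => grp_key xs y)
          (fun hc => hmem ((PySem.Set.mem_ofList _ _).mp ((PySem.List.mem_sorted _ _ _ _).mp hc)))]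
      apply List.flatMap_congr
      intro y _
      rw [grp_append]
      by_cases h : y = pvYear x
      · subst h
        have hnil : pvGrp xs (pvYear x) = [] := by
          simp only [pvGrp]
          rw [List.filter_eq_nil_iff]
          intro r hr
          simp only [decide_eq_true_eq]
          intro hk
          exact hmem (hk ▸ List.mem_map_of_mem (f := pvYear) hr)
        simp [hnil]
      · have h2 : ¬ pvYear x = y := fun hc => h hc.symm
        simp [h, h2]

theorem find_head (y : String) (rows : List (List (String × String))) :
    pvFindAud y rows = (match pvGrp rows y with | [] => "" | r :: _ => pvAud r) := by
  induction rows with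
  | nil => simp [pvFindAud, pvGrp]
  | cons r rest ih =>
    by_cases h : pvYear r = y
    · simp [pvFindAud, pvGrp, h]
    · simp [pvFindAud, pvGrp, h] at *; exact ih

theorem inner_filter (aud y : String) (rows : List (List (String × String))) (n : Int) :
    pvInnerB aud y rows n = pvGo aud (pvGrp rows y) n := by
  induction rows generalizing n with
  | nil => simp [pvInnerB, pvGrp, pvGo]
  | cons r rest ih =>
    by_cases h : pvYear r = y
    · by_cases ha : pvAud r = aud
      · simp [pvInnerB, pvGrp, pvGo, h, ha] at *; exact ih _
      · simp [pvInnerB, pvGrp, pvGo, h, ha]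
    · simp [pvInnerB, pvGrp, h] at *; exact ih _

theorem runA_append (aud : String) (l m : List (List (String × String))) (n : Int) :
    pvRunA aud (l ++ m) n =
      (match pvGo aud l n with
        | (n', true) => n'
        | (n', false) => pvRunA aud m n') := by
  induction l generalizing n with
  | nil => simp [pvGo]
  | cons r l ih =>
    by_cases ha : pvAud r = aud
    · simp [pvRunA, pvGo, ha, ih]
    · simp [pvRunA, pvGo, ha]

theorem countEq (aud : String) (rows : List (List (String × String)))
    (ys : List String) (n : Int) :
    pvRunA aud (ys.flatMap (pvGrp rows)) n = pvOuterB aud rows ys n := by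
  induction ys generalizing n with
  | nil => simp [pvRunA, pvOuterB]
  | cons y ys ih =>
    have h1 := inner_filter aud y rows n
    have h2 := runA_append aud (pvGrp rows y) (ys.flatMap (pvGrp rows)) n
    simp only [List.flatMap_cons, pvOuterB, h1, h2]
    rcases hgo : pvGo aud (pvGrp rows y) n with ⟨n', b⟩
    cases b <;> simp [ih]

-- ===== VERDICT (by name: the statement is the Claim_ definition above) =====
theorem compute_continuous_tenure_spec : Claim_equal_compute_continuous_tenure := by
  intro rows _
  unfold Spec_compute_continuous_tenure
  by_cases hnil : rows = []
  · simp [compute_continuous_tenure, compute_continuous_tenure_alt, hnil]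
  · obtain ⟨r, rest, hr⟩ : ∃ r rest, rows = r :: rest := by
      cases rows with
      | nil => exact absurd rfl hnil
      | cons a b => exact ⟨a, b, rfl⟩
    obtain ⟨y0, ytl, hys⟩ : ∃ y0 ytl, pvYears rows = y0 :: ytl := by
      have hm : pvYear r ∈ pvYears rows := by
        simp [pvYears, PySem.List.mem_sorted, PySem.Set.mem_ofList, hr]
      cases hy : pvYears rows with
      | nil => rw [hy] at hm; cases hm
      | cons a b => exact ⟨a, b, rfl⟩
    obtain ⟨r0, g0, hg0⟩ : ∃ r0 g0, pvGrp rows y0 = r0 :: g0 := by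
      have hy0 : y0 ∈ pvYears rows := by rw [hys]; simp
      have hy0m : y0 ∈ rows.map pvYear :=
        (PySem.Set.mem_ofList _ _).mp ((PySem.List.mem_sorted _ _ _ _).mp hy0)
      obtain ⟨r1, hr1, hk1⟩ := List.mem_map.mp hy0m
      have hmem : r1 ∈ pvGrp rows y0 := by
        simp [pvGrp, List.mem_filter, hr1, hk1]
      cases hgr : pvGrp rows y0 with
      | nil => rw [hgr] at hmem; cases hmem
      | cons a b => exact ⟨a, b, rfl⟩
    have hord : PySem.List.sorted rows pvYear true
        = r0 :: (g0 ++ ytl.flatMap (pvGrp rows)) := by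
      rw [sortedM, hys, List.flatMap_cons, hg0]
      simp
    have hys' : PySem.List.sorted (PySem.Set.ofList (rows.map pvYear)) (fun y => y) true
        = y0 :: ytl := hys
    have haud : pvFindAud y0 rows = pvAud r0 := by
      rw [find_head, hg0]
    have hcnt : pvRunA (pvAud r0) (PySem.List.sorted rows pvYear true) 0
        = pvOuterB (pvAud r0) rows
            (PySem.List.sorted (PySem.Set.ofList (rows.map pvYear)) (fun y => y) true) 0 := by
      have h := countEq (pvAud r0) rows (pvYears rows) 0
      rw [← sortedM] at h
      exact h
    simp only [compute_continuous_tenure, compute_continuous_tenure_alt, if_neg hnil, hord,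
      hys', haud]
    rw [← hord, hcnt, hys']
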